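-- pv_equiv track=rewrite | github.com/huhub/prototypeTester | specHdl/tools/genMemReg.py | generateFldDef
-- ===== SOURCE A (Python) =====
-- def underlinedUpperStr( orgName ):
--     field = ""
--     for i in range( len( orgName ) - 1 ):
--         if ( orgName[i].isdigit() or orgName[i].islower() ) and orgName[i+1].isupper():
--             field = field + orgName[i] + "_"
--         else:
--             field = field + orgName[i]
--     field = field + orgName[-1:]
--     return field.upper()
--
-- def generateFldDef( name, fldList ):
--     content   = ''
--     hi        = 0
--     lo        = 0
--     upperName = underlinedUpperStr( name )
--     for item in fldList[1:]:
--         flds  = item.split( '\t' )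
--         width = int( flds[2] ) - int( flds[3] ) + 1
--         upperFld = underlinedUpperStr( flds[0] )
--         midStr   = '{0}_{1}_RANGE'.format( upperName, upperFld )
--         content += '`define    {0:<64s} {1:d}:{2:d}\n'.format( midStr, hi+width-1, lo )
--         midStr   = '{0}_{1}_WIDTH'.format( upperName, upperFld )
--         content += '`define    {0:<64s} {1:d}\n\n'.format( midStr, width )
--         hi += width
--         lo += width
--
--     prefixStr  = '// {0}\n'.format( name )
--     tmpStr     = '{0}_RANGE'.format( upperName )
--     prefixStr += '`define    {0:<64s} {1:d}:0\n'.format( tmpStr, hi-1 )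
--     tmpStr     = '{0}_WIDTH'.format( upperName )
--     prefixStr += '`define    {0:<64s} {1:d}\n\n'.format( tmpStr, hi )
--     return prefixStr + content
-- ===== SOURCE B (Python) =====
-- def _fldUpper(s):
--     # camel-case boundary underscoring via pairwise zip instead of index loop
--     chars = list(s)
--     out = []
--     for a, b in zip(chars, chars[1:]):
--         out.append(a)
--         if (a.isdigit() or a.islower()) and b.isupper():
--             out.append('_')
--     out.extend(chars[-1:])
--     return ''.join(out).upper()
--
-- def _line(mid, val):
--     return '`define    ' + mid.ljust(64) + ' ' + val + '\n'
--
-- def generateFldDef(name, fldList):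
--     upperName = _fldUpper(name)
--     # pass 1: parse into a (field-name, width) table
--     table = []
--     for item in fldList[1:]:
--         f = item.split('\t')
--         table.append((_fldUpper(f[0]), int(f[2]) - int(f[3]) + 1))
--     # cumulative offsets and the total width
--     offs = []
--     total = 0
--     for _, w in table:
--         offs.append(total)
--         total += w
--     # pass 2: format everything
--     body = ''.join(
--         _line('%s_%s_RANGE' % (upperName, fld), '%d:%d' % (off + w - 1, off))
--         + _line('%s_%s_WIDTH' % (upperName, fld), '%d' % w) + '\n'
--         for (fld, w), off in zip(table, offs))
--     header = ('// %s\n' % name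
--               + _line(upperName + '_RANGE', '%d:0' % (total - 1))
--               + _line(upperName + '_WIDTH', '%d' % total) + '\n')
--     return header + body
-- ===== Notes on version B (the rewrite author's own statement) =====
-- stated objective: alternative
-- what changed: A's single loop threading (content, hi, lo) accumulators is decomposed into three passes - parse fldList[1:] into a (field, width) table, compute cumulative offsets and the total by a prefix-sum pass, then format all lines in a join - and the camel-case helper walks adjacent character pairs via zip instead of an index loop.
import Mathlib
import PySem

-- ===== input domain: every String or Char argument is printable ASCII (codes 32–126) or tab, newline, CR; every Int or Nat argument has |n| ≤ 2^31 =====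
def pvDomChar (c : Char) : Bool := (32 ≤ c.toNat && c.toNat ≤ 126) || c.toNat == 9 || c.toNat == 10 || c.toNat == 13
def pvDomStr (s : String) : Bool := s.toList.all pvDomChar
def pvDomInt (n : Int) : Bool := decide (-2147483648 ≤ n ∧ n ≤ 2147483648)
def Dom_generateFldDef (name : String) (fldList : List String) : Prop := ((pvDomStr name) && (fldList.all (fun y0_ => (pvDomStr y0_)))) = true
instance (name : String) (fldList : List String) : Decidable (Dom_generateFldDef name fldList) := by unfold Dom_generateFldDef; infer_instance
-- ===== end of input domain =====

-- B re-decomposes A's single accumulating loop into parse-table / prefix-sum / format passes (objective: alternative, same cost; return-value equivalence).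

-- '{0:<64s}'.format(s) / s.ljust(n): pad with spaces on the right to width n (shared formatting primitive)
def pyLjust (cs : List Char) (n : Nat) : List Char := cs ++ List.replicate (n - cs.length) ' '

-- ===== PORT A =====
-- underlinedUpperStr, on the code points: index loop over range(len-1)
def uuA (cs : List Char) : List Char :=
  let field := (List.range (cs.length - 1)).foldl (fun field i =>
    if (PySem.Chars.isdigit (cs.getD i ' ') || PySem.Chars.islower (cs.getD i ' '))
        && PySem.Chars.isupper (cs.getD (i + 1) ' ')
    then field ++ [cs.getD i ' ', '_'] else field ++ [cs.getD i ' ']) []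
  PySem.Chars.upper (field ++ PySem.List.slice cs (some (-1)) none)

def generateFldDef (name : String) (fldList : List String) : String :=
  let upperName := uuA name.toList
  let st := (PySem.List.slice fldList (some 1) none).foldl
    (fun (st : List Char × Int × Int) item =>
      let flds := PySem.Chars.splitOn item.toList ['\t']
      -- int(flds[2]) / int(flds[3]): Pre_ excludes inputs where the index or the parse fails (Python raises)
      let width := (PySem.Int.ofChars? (flds.getD 2 [])).getD 0
                   - (PySem.Int.ofChars? (flds.getD 3 [])).getD 0 + 1
      let upperFld := uuA (flds.getD 0 [])
      (st.1
        ++ ("`define    ".toList ++ pyLjust (upperName ++ ['_'] ++ upperFld ++ "_RANGE".toList) 64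
            ++ [' '] ++ PySem.Int.toChars (st.2.1 + width - 1) ++ [':'] ++ PySem.Int.toChars st.2.2 ++ ['\n'])
        ++ ("`define    ".toList ++ pyLjust (upperName ++ ['_'] ++ upperFld ++ "_WIDTH".toList) 64
            ++ [' '] ++ PySem.Int.toChars width ++ ['\n', '\n']),
       st.2.1 + width, st.2.2 + width))
    ([], 0, 0)
  String.ofList
    ("// ".toList ++ name.toList ++ ['\n']
      ++ "`define    ".toList ++ pyLjust (upperName ++ "_RANGE".toList) 64
         ++ [' '] ++ PySem.Int.toChars (st.2.1 - 1) ++ [':', '0', '\n']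
      ++ "`define    ".toList ++ pyLjust (upperName ++ "_WIDTH".toList) 64
         ++ [' '] ++ PySem.Int.toChars st.2.1 ++ ['\n', '\n']
      ++ st.1)

-- ===== PORT B =====
-- _fldUpper: pairwise zip over adjacent characters
def uuB (cs : List Char) : List Char :=
  let out := (cs.zip cs.tail).foldl (fun out p =>
    (out ++ [p.1]) ++
      (if (PySem.Chars.isdigit p.1 || PySem.Chars.islower p.1) && PySem.Chars.isupper p.2
       then ['_'] else [])) []
  PySem.Chars.upper (out ++ PySem.List.slice cs (some (-1)) none)

-- _line
def lineB (mid val : List Char) : List Char :=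
  "`define    ".toList ++ pyLjust mid 64 ++ [' '] ++ val ++ ['\n']

-- _row
def rowB (item : String) : List Char × Int :=
  let f := PySem.Chars.splitOn item.toList ['\t']
  (uuB (f.getD 0 []),
   (PySem.Int.ofChars? (f.getD 2 [])).getD 0 - (PySem.Int.ofChars? (f.getD 3 [])).getD 0 + 1)

def generateFldDef_alt (name : String) (fldList : List String) : String :=
  let upperName := uuB name.toList
  let table := (PySem.List.slice fldList (some 1) none).map rowB
  let ot := table.foldl (fun (st : List Int × Int) t => (st.1 ++ [st.2], st.2 + t.2))
              (([] : List Int), (0 : Int))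
  let body := ((table.zip ot.1).map (fun p =>
      lineB (upperName ++ ['_'] ++ p.1.1 ++ "_RANGE".toList)
            (PySem.Int.toChars (p.2 + p.1.2 - 1) ++ [':'] ++ PySem.Int.toChars p.2)
      ++ lineB (upperName ++ ['_'] ++ p.1.1 ++ "_WIDTH".toList) (PySem.Int.toChars p.1.2)
      ++ ['\n'])).flatten
  let header := "// ".toList ++ name.toList ++ ['\n']
      ++ lineB (upperName ++ "_RANGE".toList) (PySem.Int.toChars (ot.2 - 1) ++ [':', '0'])
      ++ lineB (upperName ++ "_WIDTH".toList) (PySem.Int.toChars ot.2) ++ ['\n']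
  String.ofList (header ++ body)

-- ===== PRECONDITION & SPEC =====
-- Pre_ excludes exactly the inputs on which A raises: an item in fldList[1:] whose tab-split has
-- fewer than 4 fields (IndexError) or whose 3rd/4th field is not a Python int literal (ValueError).
def Pre_generateFldDef (name : String) (fldList : List String) : Prop :=
  ∀ item ∈ fldList.tail,
    (let f := PySem.Chars.splitOn item.toList ['\t']
     4 ≤ f.length ∧ (PySem.Int.ofChars? (f.getD 2 [])).isSome ∧ (PySem.Int.ofChars? (f.getD 3 [])).isSome)
instance (name : String) (fldList : List String) : Decidable (Pre_generateFldDef name fldList) := by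
  unfold Pre_generateFldDef; infer_instance

def pvWitness_generateFldDef : String × List String := ("myRegX", ["hdr", "fldA\tx\t7\t0", "b9C\ty\t15\t8"])

def Spec_generateFldDef (name : String) (fldList : List String) (out : String) : Prop := out = generateFldDef_alt name fldList
instance (name : String) (fldList : List String) (out : String) : Decidable (Spec_generateFldDef name fldList out) := by unfold Spec_generateFldDef; infer_instance

-- ===== CLAIM (what is proved, stated in full; the proofs are below) =====
def Claim_equal_generateFldDef : Prop := ∀ (name : String) (fldList : List String), Dom_generateFldDef name fldList → Pre_generateFldDef name fldList → Spec_generateFldDef name fldList (generateFldDef name fldList)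

-- ===== LEMMAS AND PROOFS =====

-- zip of a list with its tail, as indexing
theorem zip_tail_eq_range_map (cs : List Char) :
    cs.zip cs.tail = (List.range (cs.length - 1)).map (fun i => (cs.getD i ' ', cs.getD (i + 1) ' ')) := by
  induction cs with
  | nil => simp
  | cons a t ih =>
    cases t with
    | nil => simp
    | cons b u =>
      have ih' := ih
      simp only [List.tail_cons] at ih' ⊢
      simp only [List.zip_cons_cons, List.length_cons, Nat.add_sub_cancel, List.range_succ_eq_map,
        List.map_cons, List.map_map]
      refine congrArg₂ List.cons rfl ?_
      simp only [List.length_cons, Nat.add_sub_cancel] at ih'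
      rw [ih']
      apply List.map_congr_left
      intro i _
      rfl

-- the two camel-case helpers agree
theorem uu_eq (cs : List Char) : uuA cs = uuB cs := by
  unfold uuA uuB
  have hA : (List.range (cs.length - 1)).foldl (fun field i =>
      if (PySem.Chars.isdigit (cs.getD i ' ') || PySem.Chars.islower (cs.getD i ' '))
          && PySem.Chars.isupper (cs.getD (i + 1) ' ')
      then field ++ [cs.getD i ' ', '_'] else field ++ [cs.getD i ' ']) []
      = (List.range (cs.length - 1)).flatMap (fun i =>
          [cs.getD i ' '] ++
            (if (PySem.Chars.isdigit (cs.getD i ' ') || PySem.Chars.islower (cs.getD i ' '))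
                && PySem.Chars.isupper (cs.getD (i + 1) ' ')
             then ['_'] else [])) := by
    rw [show (fun (field : List Char) i =>
        if (PySem.Chars.isdigit (cs.getD i ' ') || PySem.Chars.islower (cs.getD i ' '))
            && PySem.Chars.isupper (cs.getD (i + 1) ' ')
        then field ++ [cs.getD i ' ', '_'] else field ++ [cs.getD i ' ']) =
      (fun (field : List Char) i => field ++
        ([cs.getD i ' '] ++
          (if (PySem.Chars.isdigit (cs.getD i ' ') || PySem.Chars.islower (cs.getD i ' '))
              && PySem.Chars.isupper (cs.getD (i + 1) ' ')
           then ['_'] else []))) from by funext field i; split <;> rfl]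
    rw [PySem.List.foldl_append_eq_flatMap]
    rfl
  have hB : (cs.zip cs.tail).foldl (fun out p =>
      (out ++ [p.1]) ++
        (if (PySem.Chars.isdigit p.1 || PySem.Chars.islower p.1) && PySem.Chars.isupper p.2
         then ['_'] else [])) []
      = (cs.zip cs.tail).flatMap (fun p =>
          [p.1] ++
            (if (PySem.Chars.isdigit p.1 || PySem.Chars.islower p.1) && PySem.Chars.isupper p.2
             then ['_'] else [])) := by
    rw [show (fun (out : List Char) (p : Char × Char) =>
        (out ++ [p.1]) ++
          (if (PySem.Chars.isdigit p.1 || PySem.Chars.islower p.1) && PySem.Chars.isupper p.2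
           then ['_'] else [])) =
      (fun (out : List Char) (p : Char × Char) => out ++
        ([p.1] ++
          (if (PySem.Chars.isdigit p.1 || PySem.Chars.islower p.1) && PySem.Chars.isupper p.2
           then ['_'] else []))) from by funext out p; simp]
    rw [PySem.List.foldl_append_eq_flatMap]
    rfl
  rw [hA, hB, zip_tail_eq_range_map, List.flatMap_map]

-- B's body entry for one row at a given offset
def entB (u : List Char) (t : List Char × Int) (h : Int) : List Char :=
  lineB (u ++ ['_'] ++ t.1 ++ "_RANGE".toList)
        (PySem.Int.toChars (h + t.2 - 1) ++ [':'] ++ PySem.Int.toChars h)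
  ++ lineB (u ++ ['_'] ++ t.1 ++ "_WIDTH".toList) (PySem.Int.toChars t.2)
  ++ ['\n']

-- B's body, written as a direct recursion over the table with a running offset
def bodyFrom (u : List Char) (h : Int) : List (List Char × Int) → List Char
  | [] => []
  | t :: ts => entB u t h ++ bodyFrom u (h + t.2) ts

-- the offsets B's fold produces
def offsList (h : Int) : List (List Char × Int) → List Int
  | [] => []
  | t :: ts => h :: offsList (h + t.2) ts

theorem offs_fold_spec (table : List (List Char × Int)) (pre : List Int) (acc : Int) :
    table.foldl (fun (st : List Int × Int) t => (st.1 ++ [st.2], st.2 + t.2)) (pre, acc)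
      = (pre ++ offsList acc table, acc + (table.map Prod.snd).sum) := by
  induction table generalizing pre acc with
  | nil => simp [offsList]
  | cons t ts ih =>
    simp only [List.foldl_cons, ih, offsList, List.map_cons, List.sum_cons, Prod.mk.injEq]
    exact ⟨by simp, by ring⟩

theorem zip_offs_body (u : List Char) (table : List (List Char × Int)) (h : Int) :
    ((table.zip (offsList h table)).map (fun p =>
        lineB (u ++ ['_'] ++ p.1.1 ++ "_RANGE".toList)
              (PySem.Int.toChars (p.2 + p.1.2 - 1) ++ [':'] ++ PySem.Int.toChars p.2)
        ++ lineB (u ++ ['_'] ++ p.1.1 ++ "_WIDTH".toList) (PySem.Int.toChars p.1.2)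
        ++ ['\n'])).flatten = bodyFrom u h table := by
  induction table generalizing h with
  | nil => simp [bodyFrom]
  | cons t ts ih =>
    simp only [offsList, List.zip_cons_cons, List.map_cons, List.flatten_cons, bodyFrom]
    rw [ih]
    simp [entB, List.append_assoc]

-- A's loop, characterised: content is B's bodyFrom, hi = lo = running width sum
theorem loopA_spec (u : List Char) (items : List String) (c : List Char) (h : Int) :
    items.foldl
      (fun (st : List Char × Int × Int) item =>
        (st.1
          ++ ("`define    ".toList ++ pyLjust (u ++ ['_'] ++ uuB ((PySem.Chars.splitOn item.toList ['\t']).getD 0 []) ++ "_RANGE".toList) 64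
              ++ [' '] ++ PySem.Int.toChars (st.2.1 + ((PySem.Int.ofChars? ((PySem.Chars.splitOn item.toList ['\t']).getD 2 [])).getD 0 - (PySem.Int.ofChars? ((PySem.Chars.splitOn item.toList ['\t']).getD 3 [])).getD 0 + 1) - 1) ++ [':'] ++ PySem.Int.toChars st.2.2 ++ ['\n'])
          ++ ("`define    ".toList ++ pyLjust (u ++ ['_'] ++ uuB ((PySem.Chars.splitOn item.toList ['\t']).getD 0 []) ++ "_WIDTH".toList) 64
              ++ [' '] ++ PySem.Int.toChars ((PySem.Int.ofChars? ((PySem.Chars.splitOn item.toList ['\t']).getD 2 [])).getD 0 - (PySem.Int.ofChars? ((PySem.Chars.splitOn item.toList ['\t']).getD 3 [])).getD 0 + 1) ++ ['\n', '\n']),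
         st.2.1 + ((PySem.Int.ofChars? ((PySem.Chars.splitOn item.toList ['\t']).getD 2 [])).getD 0 - (PySem.Int.ofChars? ((PySem.Chars.splitOn item.toList ['\t']).getD 3 [])).getD 0 + 1), st.2.2 + ((PySem.Int.ofChars? ((PySem.Chars.splitOn item.toList ['\t']).getD 2 [])).getD 0 - (PySem.Int.ofChars? ((PySem.Chars.splitOn item.toList ['\t']).getD 3 [])).getD 0 + 1)))
      (c, h, h)
      = (c ++ bodyFrom u h (items.map rowB),
         h + ((items.map rowB).map Prod.snd).sum, h + ((items.map rowB).map Prod.snd).sum) := by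
  induction items generalizing c h with
  | nil => simp [bodyFrom]
  | cons it its ih =>
    simp only [List.foldl_cons, List.map_cons, List.sum_cons, bodyFrom]
    rw [ih]
    simp only [Prod.mk.injEq]
    refine ⟨?_, by simp [rowB]; ring, by simp [rowB]; ring⟩
    simp [entB, lineB, rowB, List.append_assoc]

-- ===== VERDICT (by name: the statement is the Claim_ definition above) =====
theorem generateFldDef_spec : Claim_equal_generateFldDef := by
  intro name fldList _ _
  simp only [Spec_generateFldDef, generateFldDef, generateFldDef_alt, uu_eq]
  rw [loopA_spec (uuB name.toList) (PySem.List.slice fldList (some 1) none) [] 0]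
  rw [offs_fold_spec (List.map rowB (PySem.List.slice fldList (some 1) none)) [] 0]
  simp only [List.nil_append, zero_add]
  rw [zip_offs_body]
  simp [lineB, List.append_assoc]
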